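-- pv_equiv track=rewrite | github.com/guitouraid/my-little-aoc | settings/_2015/settings_2015_1.py | exo2
-- ===== SOURCE A (Python) =====
-- from typing import Any
--
-- def exo2(data: str) -> Any:
--     floor = 0
--     step = 0
--     for chr in data:
--         match chr:
--             case '(':
--                 floor += 1
--                 step +=1
--             case ')':
--                 floor -= 1
--                 step += 1
--                 if floor < 0:
--                     return step
--     return step
-- ===== SOURCE B (Python) =====
-- def exo2(data: str) -> int:
--     # Phase 1: weights of the paren characters only
--     weights = [1 if c == '(' else -1 for c in data if c in '()']
--     # Phase 2: materialize the running prefix sums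
--     prefix = []
--     total = 0
--     for w in weights:
--         total += w
--         prefix.append(total)
--     # Phase 3: first index where the floor is negative (1-based step)
--     for i, p in enumerate(prefix):
--         if p < 0:
--             return i + 1
--     return len(weights)
-- ===== Notes on version B (the rewrite author's own statement) =====
-- stated objective: alternative
-- what changed: Replaces the single stateful character loop with an early return by a three-phase pipeline: filter/map parens to +/-1 weights, materialize their prefix sums, then scan for the first negative prefix (else return the paren count).
import Mathlib
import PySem

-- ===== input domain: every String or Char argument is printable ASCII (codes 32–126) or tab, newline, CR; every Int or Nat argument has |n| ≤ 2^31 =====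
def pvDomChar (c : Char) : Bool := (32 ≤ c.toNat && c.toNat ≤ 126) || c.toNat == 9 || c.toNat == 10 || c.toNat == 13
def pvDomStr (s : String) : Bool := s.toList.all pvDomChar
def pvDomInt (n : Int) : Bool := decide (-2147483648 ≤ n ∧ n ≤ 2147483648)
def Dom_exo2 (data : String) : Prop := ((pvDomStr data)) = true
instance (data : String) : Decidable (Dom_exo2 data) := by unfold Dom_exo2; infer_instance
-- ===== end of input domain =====

-- B replaces A's single stateful loop by a filter/map + prefix-sum table + scan pipeline (alternative decomposition, same cost).

-- ===== PORT A =====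
-- A's for-loop over the characters with state (floor, step) and an early return.
def exo2Loop : List Char → Int → Int → Int
  | [], _, step => step
  | c :: rest, floor, step =>
    if c = '(' then exo2Loop rest (floor + 1) (step + 1)
    else if c = ')' then
      if floor - 1 < 0 then step + 1 else exo2Loop rest (floor - 1) (step + 1)
    else exo2Loop rest floor step

def exo2 (data : String) : Int := exo2Loop data.toList 0 0

-- ===== PORT B =====
-- Source B phase 1: the weight comprehension
def pvWeights (l : List Char) : List Int :=
  (l.filter (fun c => c == '(' || c == ')')).map (fun c => if c == '(' then (1 : Int) else -1)

-- Source B phase 2: the prefix-sum building loop (appending total after each weight)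
def pvPrefix : List Int → Int → List Int
  | [], _ => []
  | w :: rest, total => (total + w) :: pvPrefix rest (total + w)

-- Source B phase 3: the enumerate scan returning i+1 at the first negative prefix
def pvFindNeg : List Int → Int → Option Int
  | [], _ => none
  | p :: rest, i => if p < 0 then some (i + 1) else pvFindNeg rest (i + 1)

def exo2_alt (data : String) : Int :=
  let weights := pvWeights data.toList
  let prefixes := pvPrefix weights 0
  match pvFindNeg prefixes 0 with
  | some s => s
  | none => (weights.length : Int)

-- ===== PRECONDITION & SPEC =====
def Spec_exo2 (data : String) (out : Int) : Prop := out = exo2_alt data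
instance (data : String) (out : Int) : Decidable (Spec_exo2 data out) := by unfold Spec_exo2; infer_instance

-- ===== CLAIM (what is proved, stated in full; the proofs are below) =====
def Claim_equal_exo2 : Prop := ∀ (data : String), Dom_exo2 data → Spec_exo2 data (exo2 data)

-- ===== LEMMAS AND PROOFS =====

-- Mid-level characterisation: steps consumed by A starting at a given floor.
def pvCore : List Char → Int → Int
  | [], _ => 0
  | c :: rest, floor =>
    if c = '(' then 1 + pvCore rest (floor + 1)
    else if c = ')' then (if floor - 1 < 0 then 1 else 1 + pvCore rest (floor - 1))
    else pvCore rest floor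

theorem exo2Loop_eq_core (l : List Char) : ∀ floor step : Int,
    exo2Loop l floor step = step + pvCore l floor := by
  induction l with
  | nil => intro floor step; simp [exo2Loop, pvCore]
  | cons c rest ih =>
    intro floor step
    by_cases h1 : c = '('
    · simp [exo2Loop, pvCore, h1, ih]; ring
    · by_cases h2 : c = ')'
      · by_cases h3 : floor - 1 < 0
        · simp [exo2Loop, pvCore, h1, h2, h3]
        · simp [exo2Loop, pvCore, h1, h2, h3, ih]; ring
      · simp [exo2Loop, pvCore, h1, h2, ih]

theorem core_eq_scan (l : List Char) : ∀ (floor i : Int), 0 ≤ floor →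
    (match pvFindNeg (pvPrefix (pvWeights l) floor) i with
     | some s => s
     | none => i + ((pvWeights l).length : Int)) = i + pvCore l floor := by
  induction l with
  | nil => intro floor i _; simp [pvWeights, pvPrefix, pvFindNeg, pvCore]
  | cons c rest ih =>
    intro floor i hfl
    by_cases h1 : c = '('
    · subst h1
      have hw : pvWeights ('(' :: rest) = 1 :: pvWeights rest := by simp [pvWeights]
      have hc : pvCore ('(' :: rest) floor = 1 + pvCore rest (floor + 1) := by simp [pvCore]
      rw [hw, hc]
      rw [show pvPrefix (1 :: pvWeights rest) floor
            = (floor + 1) :: pvPrefix (pvWeights rest) (floor + 1) from rfl]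
      rw [show pvFindNeg ((floor + 1) :: pvPrefix (pvWeights rest) (floor + 1)) i
            = if floor + 1 < 0 then some (i + 1)
              else pvFindNeg (pvPrefix (pvWeights rest) (floor + 1)) (i + 1) from rfl,
          if_neg (by omega)]
      have h := ih (floor + 1) (i + 1) (by omega)
      rcases hfn : pvFindNeg (pvPrefix (pvWeights rest) (floor + 1)) (i + 1) with _ | s
      · simp only [hfn] at h ⊢; simp at h ⊢; omega
      · simp only [hfn] at h ⊢; omega
    · by_cases h2 : c = ')'
      · subst h2
        have hw : pvWeights (')' :: rest) = -1 :: pvWeights rest := by simp [pvWeights]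
        rw [hw,
            show pvPrefix (-1 :: pvWeights rest) floor
              = (floor - 1) :: pvPrefix (pvWeights rest) (floor - 1) from rfl,
            show pvFindNeg ((floor - 1) :: pvPrefix (pvWeights rest) (floor - 1)) i
              = if floor - 1 < 0 then some (i + 1)
                else pvFindNeg (pvPrefix (pvWeights rest) (floor - 1)) (i + 1) from rfl]
        by_cases h3 : floor - 1 < 0
        · rw [if_pos h3]; simp [pvCore, h3]
        · rw [if_neg h3]
          have hc : pvCore (')' :: rest) floor = 1 + pvCore rest (floor - 1) := by
            simp [pvCore, h3]
          rw [hc]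
          have h := ih (floor - 1) (i + 1) (by omega)
          rcases hfn : pvFindNeg (pvPrefix (pvWeights rest) (floor - 1)) (i + 1) with _ | s
          · simp only [hfn] at h ⊢; simp at h ⊢; omega
          · simp only [hfn] at h ⊢; omega
      · have hw : pvWeights (c :: rest) = pvWeights rest := by simp [pvWeights, h1, h2]
        have hc : pvCore (c :: rest) floor = pvCore rest floor := by simp [pvCore, h1, h2]
        rw [hw, hc]; exact ih floor i hfl

-- ===== VERDICT (by name: the statement is the Claim_ definition above) =====
theorem exo2_spec : Claim_equal_exo2 := by
  intro data _
  unfold Spec_exo2 exo2 exo2_alt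
  rw [exo2Loop_eq_core]
  have := core_eq_scan data.toList 0 0 (by norm_num)
  rcases hfn : pvFindNeg (pvPrefix (pvWeights data.toList) 0) 0 with _ | s
  · simp only [hfn] at this ⊢; simp at this ⊢; omega
  · simp only [hfn] at this ⊢; omega
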